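-- pv_equiv track=rewrite | github.com/MCKoleman/Decipherer | v_cipher.py | get_split_text
-- ===== SOURCE A (Python) =====
-- A_UPPER = 65
--
-- Z_UPPER = 90
--
-- A_LOWER = 97
--
-- Z_LOWER = 122
--
-- def get_split_text(text: str, offset: int, split: int):
--     if split <= 1:
--         return text
--
--     result = ""
--     clean_text = get_clean_text(text)
--     for i in range(len(clean_text)):
--         if (i + offset) % split == 0:
--             result += clean_text[i]
--     return result
--
-- def get_clean_text(text: str):
--     result = ""
--     for letter in text:
--         if is_lower(letter) or is_upper(letter):
--             result += letter
--     return result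
--
-- def is_lower(letter: str):
--     return ord(letter) >= A_LOWER and ord(letter) <= Z_LOWER
--
-- def is_upper(letter: str):
--     return ord(letter) >= A_UPPER and ord(letter) <= Z_UPPER
-- ===== SOURCE B (Python) =====
-- def get_split_text(text: str, offset: int, split: int):
--     if split <= 1:
--         return text
--     clean = "".join(c for c in text if 'a' <= c <= 'z' or 'A' <= c <= 'Z')
--     return clean[(-offset) % split::split]
-- ===== Notes on version B (the rewrite author's own statement) =====
-- stated objective: idiomatic
-- what changed: B selects the kept letters by stride slicing clean[(-offset)%split::split] (index arithmetic picks every split-th letter directly) instead of A's loop over every index with a per-element (i+offset)%split==0 test and string concatenation.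
import Mathlib
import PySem

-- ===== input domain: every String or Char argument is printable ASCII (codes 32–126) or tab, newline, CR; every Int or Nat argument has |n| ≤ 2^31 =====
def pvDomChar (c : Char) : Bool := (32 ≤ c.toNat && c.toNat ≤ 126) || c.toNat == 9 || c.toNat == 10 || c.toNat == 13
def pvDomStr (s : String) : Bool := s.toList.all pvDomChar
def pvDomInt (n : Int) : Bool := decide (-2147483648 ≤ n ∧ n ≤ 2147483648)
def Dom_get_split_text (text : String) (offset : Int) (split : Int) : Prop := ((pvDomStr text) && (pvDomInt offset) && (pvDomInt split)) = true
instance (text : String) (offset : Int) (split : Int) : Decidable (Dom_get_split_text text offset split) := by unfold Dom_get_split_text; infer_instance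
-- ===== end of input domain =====

-- B replaces A's per-index modulo test with a letter filter followed by a stride slice clean[(-offset)%split::split] (objective: idiomatic).

-- ===== PORT A =====
def pvIsLower (letter : Char) : Bool := 97 ≤ letter.toNat && letter.toNat ≤ 122
def pvIsUpper (letter : Char) : Bool := 65 ≤ letter.toNat && letter.toNat ≤ 90

-- get_clean_text, transliterated ('result += letter' as list append)
def pvCleanText (text : String) : List Char :=
  text.toList.foldl (fun result letter =>
    if pvIsLower letter || pvIsUpper letter then result ++ [letter] else result) []

def get_split_text (text : String) (offset : Int) (split : Int) : String :=
  if split ≤ 1 then text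
  else
    let clean_text := pvCleanText text
    let result := (PySem.List.pyRange 0 (clean_text.length : Int) 1).foldl
      (fun result i =>
        if PySem.Int.mod (i + offset) split == 0 then
          result ++ [PySem.List.pyGetD clean_text i ' ']  -- index always in range in A's loop
        else result) []
    String.ofList result

-- ===== PORT B =====
def get_split_text_alt (text : String) (offset : Int) (split : Int) : String :=
  if split ≤ 1 then text
  else
    let clean := text.toList.filter (fun c =>
      (decide ('a' ≤ c) && decide (c ≤ 'z')) || (decide ('A' ≤ c) && decide (c ≤ 'Z')))
    -- clean[(-offset) % split :: split]; slice? is none only for step 0, and split ≥ 2 here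
    String.ofList ((PySem.List.slice? clean (some (PySem.Int.mod (-offset) split)) none split).getD [])

-- ===== PRECONDITION & SPEC =====
def Spec_get_split_text (text : String) (offset : Int) (split : Int) (out : String) : Prop := out = get_split_text_alt text offset split
instance (text : String) (offset : Int) (split : Int) (out : String) : Decidable (Spec_get_split_text text offset split out) := by unfold Spec_get_split_text; infer_instance

-- ===== CLAIM (what is proved, stated in full; the proofs are below) =====
def Claim_equal_get_split_text : Prop := ∀ (text : String) (offset : Int) (split : Int), Dom_get_split_text text offset split → Spec_get_split_text text offset split (get_split_text text offset split)

-- ===== LEMMAS AND PROOFS =====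

-- proof-side common form: select from l the elements whose running index (from j) hits the stride
def pvSel (offset split : Int) : List Char → Int → List Char
  | [], _ => []
  | c :: cs, j =>
      (if PySem.Int.mod (j + offset) split == 0 then [c] else []) ++ pvSel offset split cs (j + 1)

-- select every m-th element, the first after skipping r
def pvStride : List Char → Nat → Nat → List Char
  | [], _, _ => []
  | c :: cs, r, m => if r = 0 then c :: pvStride cs (m - 1) m else pvStride cs (r - 1) m

theorem enumLoop_eq_sel (offset split : Int) (l : List Char) : ∀ (s : Int) (acc : List Char),
    (PySem.List.enumerate l s).foldl (fun acc (p : Int × Char) =>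
      if PySem.Int.mod (p.1 + offset) split == 0 then acc ++ [p.2] else acc) acc
    = acc ++ pvSel offset split l s := by
  induction l with
  | nil => intro s acc; simp [PySem.List.enumerate_nil, pvSel]
  | cons c cs ih =>
      intro s acc
      rw [PySem.List.enumerate_cons, List.foldl_cons]
      dsimp only
      rw [ih, pvSel]
      by_cases hm : (PySem.Int.mod (s + offset) split == 0) = true
      · rw [if_pos hm, if_pos hm]; simp
      · rw [if_neg hm, if_neg hm]; simp

theorem aLoop_eq_sel (offset split : Int) (clean : List Char) :
    (PySem.List.pyRange 0 (clean.length : Int) 1).foldl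
      (fun result i =>
        if PySem.Int.mod (i + offset) split == 0 then
          result ++ [PySem.List.pyGetD clean i ' ']
        else result) []
    = pvSel offset split clean 0 := by
  have he := PySem.List.enumerate_eq_map_pyRange (xs := clean) (d := ' ')
  have : (PySem.List.pyRange 0 (clean.length : Int) 1).foldl
      (fun result i =>
        if PySem.Int.mod (i + offset) split == 0 then
          result ++ [PySem.List.pyGetD clean i ' ']
        else result) []
      = (PySem.List.enumerate clean 0).foldl (fun acc (p : Int × Char) =>
          if PySem.Int.mod (p.1 + offset) split == 0 then acc ++ [p.2] else acc) [] := by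
    rw [he, List.foldl_map]
    simp only [PySem.List.len_eq]
  rw [this, enumLoop_eq_sel]
  simp

theorem clean_eq_filter (text : String) :
    pvCleanText text = text.toList.filter (fun c => pvIsLower c || pvIsUpper c) := by
  unfold pvCleanText
  rw [PySem.List.foldl_append_if_eq_filter]
  simp

theorem filters_agree (c : Char) :
    ((decide ('a' ≤ c) && decide (c ≤ 'z')) || (decide ('A' ≤ c) && decide (c ≤ 'Z')))
      = (pvIsLower c || pvIsUpper c) := by
  have h1 : ('a' ≤ c) ↔ 97 ≤ c.toNat := by
    rw [Char.le_def, UInt32.le_iff_toNat_le]; exact Iff.rfl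
  have h2 : (c ≤ 'z') ↔ c.toNat ≤ 122 := by
    rw [Char.le_def, UInt32.le_iff_toNat_le]; exact Iff.rfl
  have h3 : ('A' ≤ c) ↔ 65 ≤ c.toNat := by
    rw [Char.le_def, UInt32.le_iff_toNat_le]; exact Iff.rfl
  have h4 : (c ≤ 'Z') ↔ c.toNat ≤ 90 := by
    rw [Char.le_def, UInt32.le_iff_toNat_le]; exact Iff.rfl
  simp only [pvIsLower, pvIsUpper, decide_eq_decide.mpr h1, decide_eq_decide.mpr h2,
    decide_eq_decide.mpr h3, decide_eq_decide.mpr h4]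

theorem sel_eq_stride (offset split : Int) (hs2 : 2 ≤ split) (l : List Char) : ∀ (j : Int),
    pvSel offset split l j
      = pvStride l (PySem.Int.mod (-(j + offset)) split).toNat split.toNat := by
  have hs : (0 : Int) < split := by omega
  induction l with
  | nil => intro j; simp [pvSel, pvStride]
  | cons c cs ih =>
      intro j
      rw [pvSel, pvStride]
      have hmod := PySem.Int.mod_eq_emod_of_pos (a := -(j + offset)) hs
      have hmod' := PySem.Int.mod_eq_emod_of_pos (a := -(j + 1 + offset)) hs
      have hnn : 0 ≤ (-(j + offset)) % split := Int.emod_nonneg _ (by omega)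
      have hlt : (-(j + offset)) % split < split := Int.emod_lt_of_pos _ hs
      have hcond : (PySem.Int.mod (j + offset) split == 0) = true
          ↔ (PySem.Int.mod (-(j + offset)) split).toNat = 0 := by
        rw [beq_iff_eq, PySem.Int.mod_eq_zero_iff_dvd, hmod, Int.toNat_eq_zero]
        constructor
        · intro hd
          have := Int.emod_eq_zero_of_dvd ((Int.dvd_neg).mpr hd)
          omega
        · intro hle
          exact (Int.dvd_neg).mp (Int.dvd_of_emod_eq_zero (by omega))
      have hone : (1 : Int) % split = 1 := Int.emod_eq_of_lt (by omega) (by omega)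
      have hstep : (-(j + 1 + offset)) % split
          = (if (-(j + offset)) % split = 0 then split - 1 else (-(j + offset)) % split - 1) := by
        have hrw : -(j + 1 + offset) = (-(j + offset)) - 1 := by ring
        rw [hrw, Int.sub_emod, hone]
        split_ifs with h0
        · rw [h0]
          have hneg : (0 : Int) - 1 = (split - 1) + split * (-1) := by ring
          rw [hneg, Int.add_mul_emod_self_left]
          exact Int.emod_eq_of_lt (by omega) (by omega)
        · exact Int.emod_eq_of_lt (by omega) (by omega)
      by_cases hz : (PySem.Int.mod (-(j + offset)) split).toNat = 0
      · rw [if_pos (hcond.mpr hz)]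
        have h0 : (-(j + offset)) % split = 0 := by rw [hmod] at hz; omega
        rw [if_pos hz, ih (j + 1)]
        simp only [List.singleton_append]
        congr 1
        have hstep0 : (-(j + 1 + offset)) % split = split - 1 := by
          rw [hstep, if_pos h0]
        simp only [hmod', hstep0]
        have he : (split - 1).toNat = split.toNat - 1 := by omega
        rw [he]
      · rw [if_neg (fun h => hz (hcond.mp h))]
        have h0 : (-(j + offset)) % split ≠ 0 := by rw [hmod] at hz; omega
        rw [if_neg hz, ih (j + 1)]
        simp only [List.nil_append]
        congr 1
        have hstep1 : (-(j + 1 + offset)) % split = (-(j + offset)) % split - 1 := by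
          rw [hstep, if_neg h0]
        simp only [hmod', hstep1, hmod]
        have he : ((-(j + offset)) % split - 1).toNat = (-(j + offset) % split).toNat - 1 := by
          omega
        rw [he]

-- ceiling count of selected indices: first at r, then every m
def pvCnt (n r m : Nat) : Nat := (n + m - 1 - r) / m

theorem stride_eq_range (m : Nat) (hm : 0 < m) (l : List Char) : ∀ (r : Nat),
    pvStride l r m = (List.range (pvCnt l.length r m)).filterMap (fun k => l[r + m * k]?) := by
  induction l with
  | nil =>
      intro r
      have h0 : pvCnt 0 r m = 0 := by
        unfold pvCnt
        exact Nat.div_eq_of_lt (by omega)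
      rw [List.length_nil, h0]
      simp [pvStride]
  | cons c cs ih =>
      intro r
      rw [pvStride]
      by_cases hr : r = 0
      · subst hr
        have hcnt : pvCnt (c :: cs).length 0 m = pvCnt cs.length (m - 1) m + 1 := by
          unfold pvCnt
          simp only [List.length_cons]
          have h1 : cs.length + 1 + m - 1 - 0 = (cs.length + m - 1 - (m - 1)) + m := by omega
          rw [h1, Nat.add_div_right _ hm]
        rw [if_pos rfl, hcnt, List.range_succ_eq_map, List.filterMap_cons, ih (m - 1)]
        simp only [Nat.mul_zero, Nat.add_zero, List.getElem?_cons_zero]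
        rw [List.filterMap_map]
        congr 1
        refine List.filterMap_congr ?_
        intro k _
        have hidx : 0 + m * (k + 1) = (m - 1 + m * k) + 1 := by
          cases m with
          | zero => omega
          | succ m' => ring_nf; omega
        simp only [Function.comp]
        rw [hidx, List.getElem?_cons_succ]
      · rw [if_neg hr, ih (r - 1)]
        have hcnt : pvCnt (c :: cs).length r m = pvCnt cs.length (r - 1) m := by
          unfold pvCnt
          simp only [List.length_cons]
          congr 1
          omega
        rw [hcnt]
        refine (List.filterMap_congr ?_).symm
        intro k _
        have hidx : r + m * k = (r - 1 + m * k) + 1 := by omega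
        rw [hidx, List.getElem?_cons_succ]

theorem slice_eq_stride (split : Int) (h2 : ¬ split ≤ 1) (l : List Char) (s : Int)
    (hs0 : 0 ≤ s) (hslt : s < split) :
    PySem.List.slice? l (some s) none split = some (pvStride l s.toNat split.toNat) := by
  have hspos : (0 : Int) < split := by omega
  unfold PySem.List.slice? PySem.List.sliceIndices
  rw [if_neg (by omega : ¬ split = 0)]
  simp only [if_neg (by omega : ¬ split < 0)]
  rw [if_neg (by omega : ¬ s < 0)]
  congr 1
  rw [stride_eq_range split.toNat (by omega) l s.toNat]
  by_cases hlen : s < (l.length : Int)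
  · rw [if_pos (by omega : 0 < split), if_pos (by rw [min_eq_left (by omega : s ≤ (l.length : Int))]; omega)]
    rw [min_eq_left (by omega : s ≤ (l.length : Int))]
    have hcnt : (((l.length : Int) - s + split - 1) / split).toNat = pvCnt l.length s.toNat split.toNat := by
      unfold pvCnt
      have hn : (l.length : Int) - s + split - 1 = ((l.length + split.toNat - 1 - s.toNat : Nat) : Int) := by
        omega
      obtain ⟨m, hm⟩ := Int.eq_ofNat_of_zero_le (le_of_lt hspos)
      have hmt : split.toNat = m := by omega
      rw [hn, hm, ← Int.natCast_ediv, Int.toNat_natCast, Int.toNat_natCast]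
    rw [hcnt]
    congr 1
    funext k
    have hmul : (split * (k : Int)).toNat = split.toNat * k := by
      rcases Int.eq_ofNat_of_zero_le (by omega : (0:Int) ≤ split) with ⟨m, rfl⟩
      rw [← Int.natCast_mul, Int.toNat_natCast, Int.toNat_natCast]
    have hidx : (s + split * (k : Int)).toNat = s.toNat + split.toNat * k := by
      have hge : (0:Int) ≤ split * (k : Int) := by positivity
      omega
    rw [hidx]
  · rw [min_eq_right (by omega : (l.length : Int) ≤ s)]
    rw [if_pos (by omega : 0 < split), if_neg (by omega : ¬ (l.length : Int) < (l.length : Int))]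
    have hcnt : pvCnt l.length s.toNat split.toNat = 0 := by
      unfold pvCnt
      exact Nat.div_eq_of_lt (by omega)
    rw [hcnt]
    simp

-- ===== VERDICT (by name: the statement is the Claim_ definition above) =====
theorem get_split_text_spec : Claim_equal_get_split_text := by
  intro text offset split _
  unfold Spec_get_split_text get_split_text get_split_text_alt
  by_cases h : split ≤ 1
  · simp [h]
  · simp only [if_neg h]
    have hspos : (0 : Int) < split := by omega
    have hfa : (fun c => (decide ('a' ≤ c) && decide (c ≤ 'z')) || (decide ('A' ≤ c) && decide (c ≤ 'Z')))
        = (fun c => pvIsLower c || pvIsUpper c) := funext filters_agree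
    rw [hfa, aLoop_eq_sel, clean_eq_filter,
      sel_eq_stride offset split (by omega) _ 0,
      slice_eq_stride split h _ (PySem.Int.mod (-offset) split)
        (PySem.Int.mod_nonneg _ hspos) (PySem.Int.mod_lt _ hspos)]
    simp
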